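-- pv_equiv track=rewrite | github.com/Parth844/AI_pdf_to_Epub | app/utils/llm_structure.py | map_sections_to_content
-- ===== SOURCE A (Python) =====
-- def map_sections_to_content(paragraphs, structure):
--     sections = []
--
--     for i, section in enumerate(structure):
--         title = section["title"]
--         snippet = section["content_start_snippet"]
--
--         # Find where this snippet appears
--         start_index = next(
--             (idx for idx, p in enumerate(paragraphs) if snippet in p),
--             None
--         )
--
--         if start_index is None:
--             continue
--
--         if i + 1 < len(structure):
--             next_snippet = structure[i + 1]["content_start_snippet"]
--             end_index = next(
--                 (idx for idx, p in enumerate(paragraphs) if next_snippet in p),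
--                 len(paragraphs)
--             )
--         else:
--             end_index = len(paragraphs)
--
--         content = paragraphs[start_index:end_index]
--         sections.append((title, content))
--
--     return sections
-- ===== SOURCE B (Python) =====
-- def map_sections_to_content(paragraphs, structure):
--     # Paragraph-major scan: walk the paragraphs ONCE, resolving all pending
--     # snippets as they are first seen (with early exit once none are pending),
--     # then assemble the sections from the resolved table.
--     pending = []
--     for sec in structure:
--         sn = sec["content_start_snippet"]
--         if sn not in pending:
--             pending.append(sn)
--     first = {}
--     for idx, p in enumerate(paragraphs):
--         if not pending:
--             break
--         for sn in pending:
--             if sn in p: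
--                 first[sn] = idx
--         pending = [sn for sn in pending if sn not in p]
--     n = len(paragraphs)
--     out = []
--     for i, sec in enumerate(structure):
--         start = first.get(sec["content_start_snippet"])
--         if start is None:
--             continue
--         if i + 1 < len(structure):
--             end = first.get(structure[i + 1]["content_start_snippet"], n)
--         else:
--             end = n
--         out.append((sec["title"], paragraphs[start:end]))
--     return out
-- ===== Notes on version B (the rewrite author's own statement) =====
-- stated objective: alternative
-- what changed: B inverts the loop nesting: instead of A's section-major loop that rescans the paragraph list from the start for every section (and again for the next section's snippet), B walks the paragraphs ONCE, resolving a shrinking pending set of distinct snippets with early exit when all are found, then assembles the sections from the resolved table.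
import Mathlib
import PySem

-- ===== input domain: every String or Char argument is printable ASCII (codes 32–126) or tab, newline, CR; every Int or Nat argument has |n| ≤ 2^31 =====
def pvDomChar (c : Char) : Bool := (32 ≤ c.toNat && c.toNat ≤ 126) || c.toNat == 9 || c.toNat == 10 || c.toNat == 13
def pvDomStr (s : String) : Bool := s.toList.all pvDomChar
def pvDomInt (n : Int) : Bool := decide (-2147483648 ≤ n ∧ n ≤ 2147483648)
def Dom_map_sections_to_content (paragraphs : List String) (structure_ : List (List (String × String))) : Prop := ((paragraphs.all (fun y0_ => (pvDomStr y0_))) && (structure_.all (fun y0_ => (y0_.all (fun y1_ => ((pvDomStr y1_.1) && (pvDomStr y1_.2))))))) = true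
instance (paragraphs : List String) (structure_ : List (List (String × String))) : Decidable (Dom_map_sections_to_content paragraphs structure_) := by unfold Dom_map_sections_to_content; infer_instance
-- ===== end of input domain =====

-- B replaces A's section-major loop (which rescans the paragraphs from the start for every
-- section's — and the next section's — snippet) by ONE paragraph-major scan that resolves all
-- pending snippets with early exit, then an assembly pass over the resolved table; 'alternative'
-- objective. Pre_ excludes inputs where Python A raises KeyError.


-- ===== PORT A =====
-- next((idx for idx, p in enumerate(paragraphs) if snippet in p), None)
def pvFirstHit (paragraphs : List String) (i : Nat) (snippet : String) : Option Nat :=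
  match paragraphs with
  | [] => none
  | p :: rest => if PySem.Str.isIn snippet p then some i else pvFirstHit rest (i + 1) snippet

-- the 'for i, section in enumerate(structure)' loop; 'sec :: rest' so that
-- structure[i+1] is the head of rest and 'i + 1 < len(structure)' is 'rest ≠ []'
def pvGoA (paragraphs : List String) (structure_ : List (List (String × String)))
    (sections : List (String × List String)) : List (String × List String) :=
  match structure_ with
  | [] => sections
  | sec :: rest =>
    let title := (PySem.Dict.get? (PySem.Dict.mk sec) "title").getD ""
    let snippet := (PySem.Dict.get? (PySem.Dict.mk sec) "content_start_snippet").getD ""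
    match pvFirstHit paragraphs 0 snippet with
    | none => pvGoA paragraphs rest sections
    | some startIndex =>
      let endIndex : Nat :=
        match rest with
        | [] => paragraphs.length
        | nextSec :: _ =>
          let nextSnippet := (PySem.Dict.get? (PySem.Dict.mk nextSec) "content_start_snippet").getD ""
          (pvFirstHit paragraphs 0 nextSnippet).getD paragraphs.length
      let content := PySem.List.slice paragraphs (some (startIndex : Int)) (some (endIndex : Int))
      pvGoA paragraphs rest (sections ++ [(title, content)])

def map_sections_to_content (paragraphs : List String) (structure_ : List (List (String × String))) : List (String × List String) :=
  pvGoA paragraphs structure_ []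

-- ===== PORT B =====
def pvSnip (sec : List (String × String)) : String :=
  (PySem.Dict.get? (PySem.Dict.mk sec) "content_start_snippet").getD ""

-- 'pending' build loop: distinct snippets, first-occurrence order
def pvBuildPending (structure_ : List (List (String × String))) (pending : List String) : List String :=
  match structure_ with
  | [] => pending
  | sec :: rest =>
    let sn := pvSnip sec
    pvBuildPending rest (if sn ∈ pending then pending else pending ++ [sn])

-- the paragraph-major scan: 'for idx, p in enumerate(paragraphs): if not pending: break; …'
def pvScan (paragraphs : List String) (idx : Nat) (pending : List String)
    (first : List (String × Nat)) : List (String × Nat) :=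
  match paragraphs with
  | [] => first
  | p :: rest =>
    if pending = [] then first
    else
      pvScan rest (idx + 1)
        (pending.filter (fun sn => ! PySem.Str.isIn sn p))
        (first ++ (pending.filter (fun sn => PySem.Str.isIn sn p)).map (fun sn => (sn, idx)))

-- the assembly loop over the resolved table
def pvEmit (paragraphs : List String) (first : List (String × Nat))
    (structure_ : List (List (String × String))) : List (String × List String) :=
  match structure_ with
  | [] => []
  | sec :: rest =>
    match List.lookup (pvSnip sec) first with
    | none => pvEmit paragraphs first rest
    | some startIndex =>
      let endIndex : Nat :=
        match rest with
        | [] => paragraphs.length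
        | nextSec :: _ => (List.lookup (pvSnip nextSec) first).getD paragraphs.length
      let title := (PySem.Dict.get? (PySem.Dict.mk sec) "title").getD ""
      (title, PySem.List.slice paragraphs (some (startIndex : Int)) (some (endIndex : Int)))
        :: pvEmit paragraphs first rest

def map_sections_to_content_alt (paragraphs : List String) (structure_ : List (List (String × String))) : List (String × List String) :=
  let pending := pvBuildPending structure_ []
  let first := pvScan paragraphs 0 pending []
  pvEmit paragraphs first structure_

-- ===== PRECONDITION & SPEC =====
-- Pre_ excludes exactly the inputs where Python A raises KeyError: a section dict missing
-- the "title" or "content_start_snippet" key.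
def Pre_map_sections_to_content (_paragraphs : List String) (structure_ : List (List (String × String))) : Prop :=
  structure_.all (fun sec => PySem.Dict.contains (PySem.Dict.mk sec) "title" && PySem.Dict.contains (PySem.Dict.mk sec) "content_start_snippet") = true
instance (paragraphs : List String) (structure_ : List (List (String × String))) : Decidable (Pre_map_sections_to_content paragraphs structure_) := by unfold Pre_map_sections_to_content; infer_instance

def pvWitness_map_sections_to_content : List String × (List (List (String × String))) :=
  (["alpha one", "beta two", "gamma three"],
   [[("title", "A"), ("content_start_snippet", "alpha")],
    [("title", "B"), ("content_start_snippet", "gamma")]])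

def Spec_map_sections_to_content (paragraphs : List String) (structure_ : List (List (String × String))) (out : List (String × List String)) : Prop := out = map_sections_to_content_alt paragraphs structure_
instance (paragraphs : List String) (structure_ : List (List (String × String))) (out : List (String × List String)) : Decidable (Spec_map_sections_to_content paragraphs structure_ out) := by unfold Spec_map_sections_to_content; infer_instance

-- ===== CLAIM (what is proved, stated in full; the proofs are below) =====
def Claim_equal_map_sections_to_content : Prop := ∀ (paragraphs : List String) (structure_ : List (List (String × String))), Dom_map_sections_to_content paragraphs structure_ → Pre_map_sections_to_content paragraphs structure_ → Spec_map_sections_to_content paragraphs structure_ (map_sections_to_content paragraphs structure_)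

-- ===== LEMMAS AND PROOFS =====
theorem lookup_map_const {v : Nat} {sn : String} {l : List String} (h : sn ∈ l) :
    List.lookup sn (l.map (fun x => (x, v))) = some v := by
  induction l with
  | nil => cases h
  | cons a t ih =>
    rcases List.mem_cons.mp h with rfl | h'
    · simp
    · cases hab : (sn == a) <;> simp [List.lookup, hab, ih h']

theorem lookup_map_const_none {v : Nat} {sn : String} {l : List String} (h : sn ∉ l) :
    List.lookup sn (l.map (fun x => (x, v))) = none := by
  induction l with
  | nil => simp
  | cons a t ih =>
    have hna : (sn == a) = false := by
      simp only [beq_eq_false_iff_ne, ne_eq]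
      exact fun e => h (e ▸ List.mem_cons_self)
    simp [List.lookup, hna, ih (fun m => h (List.mem_cons_of_mem _ m))]

theorem lookup_append {sn : String} {a b : List (String × Nat)} :
    List.lookup sn (a ++ b) = ((List.lookup sn a).or (List.lookup sn b)) := by
  induction a with
  | nil => simp [List.lookup]
  | cons x t ih => cases h : (sn == x.1) <;> simp [List.lookup, h, ih]

-- scan never touches keys outside 'pending'
theorem pvScan_lookup_not_mem {sn : String} (paragraphs : List String) (idx : Nat)
    (pending : List String) (first : List (String × Nat)) (h : sn ∉ pending) :
    List.lookup sn (pvScan paragraphs idx pending first) = List.lookup sn first := by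
  induction paragraphs generalizing idx pending first with
  | nil => simp [pvScan]
  | cons p rest ih =>
    by_cases hp : pending = []
    · simp [pvScan, hp]
    · rw [pvScan]
      simp only [hp, if_false]
      rw [ih _ _ _ (fun m => h (List.mem_filter.mp m).1), lookup_append,
        lookup_map_const_none (fun m => h (List.mem_filter.mp m).1)]
      simp

-- the invariant: for a pending snippet not yet in the table, the scan's answer is
-- exactly A's first-hit search from the same index
theorem pvScan_lookup_mem {sn : String} (paragraphs : List String) (idx : Nat)
    (pending : List String) (first : List (String × Nat))
    (h : sn ∈ pending) (hf : List.lookup sn first = none) :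
    List.lookup sn (pvScan paragraphs idx pending first) = pvFirstHit paragraphs idx sn := by
  induction paragraphs generalizing idx pending first with
  | nil => simp [pvScan, pvFirstHit, hf]
  | cons p rest ih =>
    have hp : pending ≠ [] := by rintro rfl; cases h
    rw [pvScan]; simp only [hp, if_false]
    cases hin : PySem.Str.isIn sn p with
    | true =>
      rw [pvFirstHit]; simp only [hin, if_true]
      rw [pvScan_lookup_not_mem _ _ _ _
            (fun m => by
              have h2 : (! PySem.Str.isIn sn p) = true := (List.mem_filter.mp m).2
              rw [hin] at h2; cases h2),
        lookup_append, hf, lookup_map_const (List.mem_filter.mpr ⟨h, hin⟩)]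
      simp
    | false =>
      rw [pvFirstHit]; simp only [hin, Bool.false_eq_true, if_false]
      exact ih _ _ _ (List.mem_filter.mpr ⟨h, by rw [hin]; rfl⟩)
        (by rw [lookup_append, hf,
              lookup_map_const_none (fun m => by
                have h2 : PySem.Str.isIn sn p = true := (List.mem_filter.mp m).2
                rw [hin] at h2; cases h2)]
            simp)

theorem pvBuildPending_mono {sn : String} (structure_ : List (List (String × String)))
    (acc : List String) (h : sn ∈ acc) : sn ∈ pvBuildPending structure_ acc := by
  induction structure_ generalizing acc with
  | nil => exact h
  | cons sec rest ih =>
    rw [pvBuildPending]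
    exact ih _ (by split <;> simp [h])

theorem pvBuildPending_mem {sec : List (String × String)} (structure_ : List (List (String × String)))
    (acc : List String) (h : sec ∈ structure_) : pvSnip sec ∈ pvBuildPending structure_ acc := by
  induction structure_ generalizing acc with
  | nil => cases h
  | cons s rest ih =>
    rcases List.mem_cons.mp h with rfl | h'
    · rw [pvBuildPending]
      exact pvBuildPending_mono _ _ (by split <;> simp_all)
    · exact ih _ h'

-- unfolding equations (definitional) for the two cons-step loops
theorem pvGoA_cons (paragraphs : List String) (sec : List (String × String))
    (rest : List (List (String × String))) (acc : List (String × List String)) :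
    pvGoA paragraphs (sec :: rest) acc =
      (match pvFirstHit paragraphs 0 (pvSnip sec) with
       | none => pvGoA paragraphs rest acc
       | some startIndex =>
         pvGoA paragraphs rest (acc ++
           [((PySem.Dict.get? (PySem.Dict.mk sec) "title").getD "",
             PySem.List.slice paragraphs (some (startIndex : Int))
               (some (((match rest with
                        | [] => paragraphs.length
                        | nextSec :: _ =>
                          (pvFirstHit paragraphs 0 (pvSnip nextSec)).getD paragraphs.length : Nat) : Int))))])) := rfl

theorem pvEmit_cons (paragraphs : List String) (first : List (String × Nat))
    (sec : List (String × String)) (rest : List (List (String × String))) :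
    pvEmit paragraphs first (sec :: rest) =
      (match List.lookup (pvSnip sec) first with
       | none => pvEmit paragraphs first rest
       | some startIndex =>
         ((PySem.Dict.get? (PySem.Dict.mk sec) "title").getD "",
          PySem.List.slice paragraphs (some (startIndex : Int))
            (some (((match rest with
                     | [] => paragraphs.length
                     | nextSec :: _ =>
                       (List.lookup (pvSnip nextSec) first).getD paragraphs.length : Nat) : Int))))
           :: pvEmit paragraphs first rest) := rfl

-- loop correspondence: A's accumulator loop equals the accumulator prepended to B's
-- table-driven assembly, whenever the table answers like A's first-hit search
theorem pvGoA_eq_emit (paragraphs : List String) (first : List (String × Nat))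
    (structure_ : List (List (String × String))) (acc : List (String × List String))
    (h : ∀ sec ∈ structure_, List.lookup (pvSnip sec) first = pvFirstHit paragraphs 0 (pvSnip sec)) :
    pvGoA paragraphs structure_ acc = acc ++ pvEmit paragraphs first structure_ := by
  induction structure_ generalizing acc with
  | nil => simp [pvGoA, pvEmit]
  | cons sec rest ih =>
    have hsec := h sec List.mem_cons_self
    have hrest : ∀ s ∈ rest, List.lookup (pvSnip s) first = pvFirstHit paragraphs 0 (pvSnip s) :=
      fun s hs => h s (List.mem_cons_of_mem _ hs)
    rw [pvGoA_cons, pvEmit_cons, hsec]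
    cases hfh : pvFirstHit paragraphs 0 (pvSnip sec) with
    | none => simp only []; exact ih _ hrest
    | some startIndex =>
      cases rest with
      | nil =>
        simp only []
        rw [ih _ hrest]
        simp [pvEmit]
      | cons nextSec restS =>
        simp only [hrest nextSec List.mem_cons_self]
        rw [ih _ hrest]
        simp

-- ===== VERDICT (by name: the statement is the Claim_ definition above) =====
theorem map_sections_to_content_spec : Claim_equal_map_sections_to_content := by
  intro paragraphs structure_ _ _
  unfold Spec_map_sections_to_content map_sections_to_content map_sections_to_content_alt
  exact pvGoA_eq_emit paragraphs _ structure_ []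
    (fun sec hs => pvScan_lookup_mem paragraphs 0 _ []
      (pvBuildPending_mem structure_ [] hs) (by simp [List.lookup]))
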